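-- pv_equiv track=rewrite | github.com/saikn85/BikeShare-Analysis | bikeshare.py | birth_years
-- ===== SOURCE A (Python) =====
-- from collections import Counter
-- from operator import itemgetter
--
-- def birth_years(ordered_data):
--     """
--     Question: What are the earliest, most recent, and most popular birth years?
--     """
--     list_of_birth_years = []
--
--     for i in range(0, len(ordered_data)):
--         temp_var = ordered_data[i]['Year_of_Birth']
--         list_of_birth_years.append(temp_var)
--
--     count_of_birth_years = dict(Counter(list_of_birth_years))
--
--     del count_of_birth_years['N/A']
--
--     if (not count_of_birth_years):
--
--         return "N/A"
--
--     else: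
--
--         new_list_br_yr = sorted(count_of_birth_years.items())
--
--         earliest = new_list_br_yr[0][0], new_list_br_yr[0][1]
--
--         recent = new_list_br_yr[-1][0], new_list_br_yr[-1][1]
--
--         max_key = max(count_of_birth_years.items(), key=itemgetter(1))[0]
--
--         max_value = count_of_birth_years[max_key]
--
--         return (earliest, recent, (max_key, max_value))
-- ===== SOURCE B (Python) =====
-- def birth_years(ordered_data):
--     count = {}
--     for row in ordered_data:
--         year = row['Year_of_Birth']
--         count[year] = count.get(year, 0) + 1
--     del count['N/A']
--     if not count:
--         return "N/A"
--     earliest_year = min(count)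
--     recent_year = max(count)
--     popular = None
--     for item in count.items():
--         if popular is None or item[1] > popular[1]:
--             popular = item
--     return ((earliest_year, count[earliest_year]),
--             (recent_year, count[recent_year]),
--             popular)
-- ===== Notes on version B (the rewrite author's own statement) =====
-- stated objective: simpler
-- what changed: B builds the year counter in one dict pass and reads the earliest/most-recent years with direct min/max scans over the keys and the mode with a single running-best loop, instead of A's index-loop list building, Counter conversion and full sort of the items.
-- outside the precondition, e.g. on birth_years([{'Year_of_Birth': 'N/A'}]): A returns 'N/A', B returns 'N/A'
import Mathlib
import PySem

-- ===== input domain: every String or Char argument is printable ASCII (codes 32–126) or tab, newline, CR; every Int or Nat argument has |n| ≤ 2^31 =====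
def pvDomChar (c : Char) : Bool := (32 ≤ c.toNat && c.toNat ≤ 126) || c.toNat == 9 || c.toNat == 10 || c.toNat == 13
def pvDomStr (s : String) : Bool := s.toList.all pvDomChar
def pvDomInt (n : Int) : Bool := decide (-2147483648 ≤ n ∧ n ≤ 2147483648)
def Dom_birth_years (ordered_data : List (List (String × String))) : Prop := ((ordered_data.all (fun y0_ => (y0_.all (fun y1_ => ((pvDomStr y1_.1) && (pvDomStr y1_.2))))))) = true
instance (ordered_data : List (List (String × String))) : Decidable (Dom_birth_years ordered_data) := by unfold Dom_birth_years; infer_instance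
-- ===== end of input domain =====

-- B replaces A's index loop + Counter conversion + full sort of the items by one counting pass
-- and direct min/max/running-best scans (objective: simpler).

-- ===== PORT A =====
def birth_years (ordered_data : List (List (String × String))) : (String × Int) × (String × Int) × (String × Int) :=
  let list_of_birth_years :=
    (PySem.List.pyRange 0 (ordered_data.length : Int)).foldl
      (fun acc i =>
        acc ++ [(PySem.Dict.mk (PySem.List.pyGetD ordered_data i [])).getD "Year_of_Birth" ""]) []
      -- row['Year_of_Birth'] raises KeyError when absent: excluded by Pre_, so the total getD is exact there
  let count_of_birth_years := (PySem.Dict.counter list_of_birth_years).erase "N/A"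
      -- del count['N/A'] raises KeyError when 'N/A' is absent: excluded by Pre_
  if count_of_birth_years.items = [] then
    (("N/A", 0), ("N/A", 0), ("N/A", 0))  -- Python returns the STRING "N/A" here (not a tuple): excluded by Pre_
  else
    let new_list_br_yr := PySem.List.sorted count_of_birth_years.items (fun p => p.1) false
      -- sorted(count.items()): exact, because the counter's keys are distinct so Python's
      -- tuple comparison is decided by the first component on every admitted input
    let earliest := PySem.List.pyGetD new_list_br_yr 0 ("", 0)
    let recent := PySem.List.pyGetD new_list_br_yr (-1) ("", 0)
    let max_key := ((PySem.List.max? count_of_birth_years.items (fun p => p.2)).getD ("", 0)).1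
    let max_value := count_of_birth_years.getD max_key 0
    ((earliest.1, earliest.2), (recent.1, recent.2), (max_key, max_value))

-- ===== PORT B =====
def birth_years_alt (ordered_data : List (List (String × String))) : (String × Int) × (String × Int) × (String × Int) :=
  let count0 := ordered_data.foldl
    (fun d row =>
      let year := (PySem.Dict.mk row).getD "Year_of_Birth" ""  -- KeyError when absent: excluded by Pre_
      d.insert year (d.getD year 0 + 1)) PySem.Dict.empty
  let count := count0.erase "N/A"  -- del count['N/A']: KeyError when absent, excluded by Pre_
  if count.items = [] then
    (("N/A", 0), ("N/A", 0), ("N/A", 0))  -- Python returns the STRING "N/A" here: excluded by Pre_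
  else
    let earliest_year := (PySem.List.min? count.keys (fun k => k)).getD ""
    let recent_year := (PySem.List.max? count.keys (fun k => k)).getD ""
    let popular := count.items.foldl
      (fun best item =>
        match best with
        | none => some item
        | some b => if b.2 < item.2 then some item else some b) none
    ((earliest_year, count.getD earliest_year 0),
     (recent_year, count.getD recent_year 0),
     popular.getD ("", 0))

-- ===== PRECONDITION & SPEC =====
-- Pre_ excludes the inputs where A raises KeyError (a row without the 'Year_of_Birth' key, or no
-- 'N/A' year at all for the del), and the inputs whose every year is 'N/A', on which A returns the
-- string "N/A" instead of a value of the declared tuple type (B does the same there).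
def Pre_birth_years (ordered_data : List (List (String × String))) : Prop :=
  (∀ row ∈ ordered_data, (PySem.Dict.mk row).contains "Year_of_Birth" = true) ∧
  ("N/A" ∈ ordered_data.map (fun row => (PySem.Dict.mk row).getD "Year_of_Birth" "")) ∧
  (∃ row ∈ ordered_data, (PySem.Dict.mk row).getD "Year_of_Birth" "" ≠ "N/A")
instance (ordered_data : List (List (String × String))) : Decidable (Pre_birth_years ordered_data) := by
  unfold Pre_birth_years; infer_instance

def pvWitness_birth_years : (List (List (String × String))) :=
  [[("Year_of_Birth", "N/A")], [("Year_of_Birth", "1990")], [("Year_of_Birth", "1990")]]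

def Spec_birth_years (ordered_data : List (List (String × String))) (out : (String × Int) × (String × Int) × (String × Int)) : Prop := out = birth_years_alt ordered_data
instance (ordered_data : List (List (String × String))) (out : (String × Int) × (String × Int) × (String × Int)) : Decidable (Spec_birth_years ordered_data out) := by unfold Spec_birth_years; infer_instance

-- ===== CLAIM (what is proved, stated in full; the proofs are below) =====
def Claim_equal_birth_years : Prop := ∀ (ordered_data : List (List (String × String))), Dom_birth_years ordered_data → Pre_birth_years ordered_data → Spec_birth_years ordered_data (birth_years ordered_data)

-- ===== LEMMAS AND PROOFS =====

def g_row (row : List (String × String)) : String := (PySem.Dict.mk row).getD "Year_of_Birth" ""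

theorem c_items (ys : List String) :
    ((PySem.Dict.counter ys).erase "N/A").items =
      ((PySem.Set.ofList ys : List String).filter (fun k => !(k == "N/A"))).map
        (fun k => (k, (List.count k ys : Int))) := by
  show List.filter _ (PySem.Dict.counter ys).items = _
  rw [PySem.Dict.items_counter, List.filter_map]
  rfl

theorem c_keys (ys : List String) :
    ((PySem.Dict.counter ys).erase "N/A").keys =
      (PySem.Set.ofList ys : List String).filter (fun k => !(k == "N/A")) := by
  show (((PySem.Dict.counter ys).erase "N/A").items).map Prod.fst = _
  rw [c_items, List.map_map]
  simp [Function.comp_def]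

theorem K_nodup (ys : List String) :
    ((PySem.Set.ofList ys : List String).filter (fun k => !(k == "N/A"))).Nodup :=
  (PySem.Set.nodup_ofList ys).filter _

theorem c_getD (ys : List String) (k : String)
    (hk : k ∈ (PySem.Set.ofList ys : List String).filter (fun k => !(k == "N/A"))) :
    ((PySem.Dict.counter ys).erase "N/A").getD k 0 = (List.count k ys : Int) := by
  apply PySem.Dict.getD_of_mem_items
  · rw [c_items]; exact List.mem_map.mpr ⟨k, hk, rfl⟩
  · rw [c_keys]; exact K_nodup ys

theorem A_list (od : List (List (String × String))) :
    ((PySem.List.pyRange 0 (od.length : Int)).foldl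
      (fun acc i =>
        acc ++ [(PySem.Dict.mk (PySem.List.pyGetD od i [])).getD "Year_of_Birth" ""]) []) =
      od.map g_row := by
  have := PySem.List.foldl_pyRange_zero_pyGetD' od [] (fun acc row => acc ++ [g_row row]) []
  simp only [g_row] at this
  rw [this]
  exact PySem.List.foldl_append_singleton_eq_map _ _ _

theorem B_count (od : List (List (String × String))) :
    (od.foldl
      (fun d row =>
        let year := (PySem.Dict.mk row).getD "Year_of_Birth" ""
        d.insert year (d.getD year 0 + 1)) PySem.Dict.empty) =
      PySem.Dict.counter (od.map g_row) := by
  rw [← PySem.Dict.foldl_insert_getD_add_one_eq_counter, List.foldl_map]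
  rfl

theorem tail_eq (ys : List String)
    (hx : ∃ y ∈ ys, y ≠ "N/A") :
    (let c := (PySem.Dict.counter ys).erase "N/A"
     if c.items = [] then
      (("N/A", (0:Int)), ("N/A", (0:Int)), ("N/A", (0:Int)))
     else
      let new_list_br_yr := PySem.List.sorted c.items (fun p => p.1) false
      let earliest := PySem.List.pyGetD new_list_br_yr 0 ("", 0)
      let recent := PySem.List.pyGetD new_list_br_yr (-1) ("", 0)
      let max_key := ((PySem.List.max? c.items (fun p => p.2)).getD ("", 0)).1
      let max_value := c.getD max_key 0
      ((earliest.1, earliest.2), (recent.1, recent.2), (max_key, max_value))) =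
    (let c := (PySem.Dict.counter ys).erase "N/A"
     if c.items = [] then
      (("N/A", (0:Int)), ("N/A", (0:Int)), ("N/A", (0:Int)))
     else
      let earliest_year := (PySem.List.min? c.keys (fun k => k)).getD ""
      let recent_year := (PySem.List.max? c.keys (fun k => k)).getD ""
      let popular := c.items.foldl
        (fun best item =>
          match best with
          | none => some item
          | some b => if b.2 < item.2 then some item else some b) none
      ((earliest_year, c.getD earliest_year 0),
       (recent_year, c.getD recent_year 0),
       popular.getD ("", 0))) := by
  set c := (PySem.Dict.counter ys).erase "N/A" with hc
  set K := (PySem.Set.ofList ys : List String).filter (fun k => !(k == "N/A")) with hKdef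
  set f : String → String × Int := fun k => (k, (List.count k ys : Int)) with hf
  have hitems : c.items = K.map f := c_items ys
  have hkeys : c.keys = K := c_keys ys
  have hKnd : K.Nodup := K_nodup ys
  have hKne : K ≠ [] := by
    obtain ⟨y, hy, hyne⟩ := hx
    intro hnil
    have : y ∈ K := by
      rw [hKdef]
      refine List.mem_filter.mpr ⟨(PySem.Set.mem_ofList _ _).mpr hy, by simp [hyne]⟩
    simp [hnil] at this
  have hne : ¬ (c.items = []) := by
    rw [hitems]; simpa using hKne
  simp only [if_neg hne]
  set L := PySem.List.sorted c.items (fun p => p.1) false with hLdef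
  have hLne : L ≠ [] := by rw [hLdef, Ne, PySem.List.sorted_eq_nil_iff]; exact hne
  obtain ⟨h, t, hlt⟩ := List.exists_cons_of_ne_nil hLne
  -- earliest
  obtain ⟨m, hm⟩ : ∃ m, PySem.List.min? c.keys (fun k => k) = some m := by
    cases hmin : PySem.List.min? c.keys (fun k => k) with
    | none => rw [PySem.List.min?_eq_none_iff, hkeys] at hmin; exact absurd hmin hKne
    | some m => exact ⟨m, rfl⟩
  have hmK : m ∈ K := hkeys ▸ PySem.List.min?_mem hm
  have hhmem : h ∈ K.map f := by
    rw [← hitems, ← PySem.List.mem_sorted c.items (fun p => p.1) false, ← hLdef, hlt]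
    exact List.mem_cons_self
  obtain ⟨a, haK, hfa⟩ := List.mem_map.mp hhmem
  have hh1 : h.1 = m := by
    have h1 : h.1 ≤ (f m).1 := by
      refine PySem.List.key_head_sorted_le c.items (fun p => p.1) (hLdef ▸ hlt) (f m) ?_
      rw [hitems]; exact List.mem_map_of_mem hmK
    have h2 : m ≤ h.1 := by
      refine PySem.List.min?_isMin hm h.1 ?_
      rw [hkeys, ← hfa]; exact haK
    exact le_antisymm h1 h2
  have hh2 : h.2 = (List.count h.1 ys : Int) := by rw [← hfa]
  have hE : PySem.List.pyGetD L 0 ("", (0:Int)) = h := by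
    rw [hlt]; exact PySem.List.pyGetD_zero_cons _ _ _
  have hgm : c.getD m 0 = (List.count m ys : Int) := c_getD ys m hmK
  -- recent
  obtain ⟨M, hM⟩ : ∃ M, PySem.List.max? c.keys (fun k => k) = some M := by
    cases hmax : PySem.List.max? c.keys (fun k => k) with
    | none => rw [PySem.List.max?_eq_none_iff, hkeys] at hmax; exact absurd hmax hKne
    | some M => exact ⟨M, rfl⟩
  have hMK : M ∈ K := hkeys ▸ PySem.List.max?_mem hM
  have hR : PySem.List.pyGetD L (-1) ("", (0:Int)) = L.getLast hLne :=
    PySem.List.pyGetD_neg_one _ _ hLne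
  have hlastmem : L.getLast hLne ∈ K.map f := by
    rw [← hitems, ← PySem.List.mem_sorted c.items (fun p => p.1) false, ← hLdef]
    exact List.getLast_mem hLne
  obtain ⟨b, hbK, hfb⟩ := List.mem_map.mp hlastmem
  have hlast1 : (L.getLast hLne).1 = M := by
    have h1 : (L.getLast hLne).1 ≤ M := by
      refine PySem.List.max?_isMax hM (L.getLast hLne).1 ?_
      rw [hkeys, ← hfb]; exact hbK
    have h2 : M ≤ (L.getLast hLne).1 := by
      have hfM : f M ∈ L := by
        rw [hLdef, PySem.List.mem_sorted, hitems]; exact List.mem_map_of_mem hMK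
      obtain ⟨p, hp, hpe⟩ := List.mem_iff_getElem.mp hfM
      have hq : L.length - 1 < L.length := by
        have : L.length ≠ 0 := by simpa using hLne
        omega
      have hmono := PySem.List.key_sorted_getElem_mono c.items (fun p => p.1)
        (p := p) (q := L.length - 1) (by omega) (by rw [← hLdef]; exact hq)
      rw [List.getLast_eq_getElem hLne]
      show (f M).1 ≤ L[L.length - 1].1
      rw [← hpe]
      exact hmono
    exact le_antisymm h1 h2
  have hlast2 : (L.getLast hLne).2 = (List.count (L.getLast hLne).1 ys : Int) := by rw [← hfb]
  have hgM : c.getD M 0 = (List.count M ys : Int) := c_getD ys M hMK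
  -- most popular
  have hpop : (c.items.foldl
      (fun best item =>
        match best with
        | none => some item
        | some b => if b.2 < item.2 then some item else some b) none) =
      PySem.List.max? c.items (fun p => p.2) := by
    unfold PySem.List.max?
    congr 1
    funext acc x
    cases acc <;> rfl
  obtain ⟨pr, hpr⟩ : ∃ pr, PySem.List.max? c.items (fun p => p.2) = some pr := by
    cases hmx : PySem.List.max? c.items (fun p => p.2) with
    | none => rw [PySem.List.max?_eq_none_iff] at hmx; exact absurd hmx hne
    | some pr => exact ⟨pr, rfl⟩
  obtain ⟨b', hb'K, hfb'⟩ := List.mem_map.mp (hitems ▸ PySem.List.max?_mem hpr)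
  have hgpr : c.getD pr.1 0 = pr.2 := by
    have h1 : pr.1 ∈ K := by rw [← hfb']; exact hb'K
    rw [c_getD ys pr.1 h1, ← hfb']
  rw [hE, hR, hm, hM, hpr, hpop, hpr]
  simp only [Option.getD_some]
  rw [hgm, hgM, hgpr, hh2, hh1, hlast2, hlast1]

theorem birth_years_main (ordered_data : List (List (String × String)))
    (hpre : Pre_birth_years ordered_data) :
    birth_years ordered_data = birth_years_alt ordered_data := by
  obtain ⟨hcontains, hNA, hx⟩ := hpre
  have hx' : ∃ y ∈ ordered_data.map g_row, y ≠ "N/A" := by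
    obtain ⟨row, hrow, hne⟩ := hx
    exact ⟨g_row row, List.mem_map_of_mem hrow, hne⟩
  unfold birth_years birth_years_alt
  rw [A_list ordered_data, B_count ordered_data]
  exact tail_eq (ordered_data.map g_row) hx'

-- ===== VERDICT (by name: the statement is the Claim_ definition above) =====
theorem birth_years_spec : Claim_equal_birth_years := by
  intro od _ hpre
  exact birth_years_main od hpre
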